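-- pv_equiv track=rewrite | github.com/Shamoo100/vecapp_ai_dev | app/services/member_service.py | _extract_communication_preferences
-- ===== SOURCE A (Python) =====
-- from typing import Dict, Any, Optional, List
--
-- def _extract_communication_preferences(person: Dict[str, Any], notes: List[Dict[str, Any]]) -> Dict[str, Any]:
--     """Extract communication preferences from person data and notes."""
--     preferences = {
--         'preferred_method': 'email',  # Default
--         'best_time_to_contact': 'evening',  # Default
--         'frequency': 'weekly'  # Default
--     }
--
--     # Check notes for communication preferences
--     for note in notes:
--         note_content = note.get('note', '').lower()
--         if 'prefers phone' in note_content or 'call' in note_content: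
--             preferences['preferred_method'] = 'phone'
--         elif 'prefers text' in note_content or 'text message' in note_content:
--             preferences['preferred_method'] = 'text'
--
--         if 'morning' in note_content:
--             preferences['best_time_to_contact'] = 'morning'
--         elif 'afternoon' in note_content:
--             preferences['best_time_to_contact'] = 'afternoon'
--
--     return preferences
-- ===== SOURCE B (Python) =====
-- from typing import Dict, Any, List
--
-- def _classify_method(content):
--     if 'prefers phone' in content or 'call' in content:
--         return 'phone'
--     if 'prefers text' in content or 'text message' in content:
--         return 'text'
--     return None
--
-- def _classify_time(content):
--     if 'morning' in content:
--         return 'morning'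
--     if 'afternoon' in content:
--         return 'afternoon'
--     return None
--
-- def _extract_communication_preferences(person: Dict[str, Any], notes: List[Dict[str, Any]]) -> Dict[str, Any]:
--     """Extract communication preferences from person data and notes."""
--     contents = [note.get('note', '').lower() for note in notes]
--     contents.reverse()
--     method = next((m for m in map(_classify_method, contents) if m is not None), 'email')
--     best_time = next((t for t in map(_classify_time, contents) if t is not None), 'evening')
--     return {
--         'preferred_method': method,
--         'best_time_to_contact': best_time,
--         'frequency': 'weekly',
--     }
-- ===== Notes on version B (the rewrite author's own statement) =====
-- stated objective: alternative
-- what changed: Replaces A's single forward pass that repeatedly overwrites a dict with a map of each note to an Optional classification and a last-match-wins selection (first hit of the reversed classified list, with a default) per field, building the result dict once.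
import Mathlib
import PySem

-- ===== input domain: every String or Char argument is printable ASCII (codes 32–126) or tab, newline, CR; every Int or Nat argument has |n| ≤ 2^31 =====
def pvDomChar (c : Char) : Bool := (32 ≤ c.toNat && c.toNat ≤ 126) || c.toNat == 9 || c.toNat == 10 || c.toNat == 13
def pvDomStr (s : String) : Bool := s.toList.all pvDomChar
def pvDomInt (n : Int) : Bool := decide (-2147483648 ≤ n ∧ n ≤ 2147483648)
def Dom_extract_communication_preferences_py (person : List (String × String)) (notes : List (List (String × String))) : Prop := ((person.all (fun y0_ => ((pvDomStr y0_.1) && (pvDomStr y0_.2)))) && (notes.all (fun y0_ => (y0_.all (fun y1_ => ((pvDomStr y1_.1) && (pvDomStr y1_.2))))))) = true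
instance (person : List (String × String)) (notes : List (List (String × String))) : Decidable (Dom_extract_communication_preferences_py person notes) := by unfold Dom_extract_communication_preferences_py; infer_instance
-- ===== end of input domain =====

-- B replaces A's single forward pass (repeatedly overwriting a dict) with a map of every note to
-- an Optional classification per field and a last-match-wins pick (head of the reversed classified
-- list, with a default), building the result dict once (alternative decomposition).


-- ===== PORT A =====
def pvAStep (prefs : PySem.Dict String String) (note : List (String × String)) : PySem.Dict String String :=
  let c := PySem.Str.lower (PySem.Dict.getD ⟨note⟩ "note" "")
  let prefs1 :=
    if PySem.Str.isIn "prefers phone" c || PySem.Str.isIn "call" c then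
      prefs.insert "preferred_method" "phone"
    else if PySem.Str.isIn "prefers text" c || PySem.Str.isIn "text message" c then
      prefs.insert "preferred_method" "text"
    else prefs
  if PySem.Str.isIn "morning" c then prefs1.insert "best_time_to_contact" "morning"
  else if PySem.Str.isIn "afternoon" c then prefs1.insert "best_time_to_contact" "afternoon"
  else prefs1

def extract_communication_preferences_py (person : List (String × String)) (notes : List (List (String × String))) : List (String × String) :=
  (notes.foldl pvAStep
    (PySem.Dict.mk [("preferred_method", "email"), ("best_time_to_contact", "evening"), ("frequency", "weekly")])).items

-- ===== PORT B =====
def pvClassifyMethod (content : String) : Option String :=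
  if PySem.Str.isIn "prefers phone" content || PySem.Str.isIn "call" content then some "phone"
  else if PySem.Str.isIn "prefers text" content || PySem.Str.isIn "text message" content then some "text"
  else none

def pvClassifyTime (content : String) : Option String :=
  if PySem.Str.isIn "morning" content then some "morning"
  else if PySem.Str.isIn "afternoon" content then some "afternoon"
  else none

def extract_communication_preferences_py_alt (person : List (String × String)) (notes : List (List (String × String))) : List (String × String) :=
  let contents := (notes.map (fun note => PySem.Str.lower (PySem.Dict.getD ⟨note⟩ "note" ""))).reverse
  [("preferred_method", ((contents.map pvClassifyMethod).reduceOption).headD "email"),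
   ("best_time_to_contact", ((contents.map pvClassifyTime).reduceOption).headD "evening"),
   ("frequency", "weekly")]

-- ===== PRECONDITION & SPEC =====
def Spec_extract_communication_preferences_py (person : List (String × String)) (notes : List (List (String × String))) (out : List (String × String)) : Prop := out = extract_communication_preferences_py_alt person notes
instance (person : List (String × String)) (notes : List (List (String × String))) (out : List (String × String)) : Decidable (Spec_extract_communication_preferences_py person notes out) := by unfold Spec_extract_communication_preferences_py; infer_instance

-- ===== CLAIM (what is proved, stated in full; the proofs are below) =====
def Claim_equal_extract_communication_preferences_py : Prop := ∀ (person : List (String × String)) (notes : List (List (String × String))), Dom_extract_communication_preferences_py person notes → Spec_extract_communication_preferences_py person notes (extract_communication_preferences_py person notes)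

-- ===== LEMMAS AND PROOFS =====

def pvLow (note : List (String × String)) : String :=
  PySem.Str.lower (PySem.Dict.getD ⟨note⟩ "note" "")

-- B's per-field pick, abstract in the classifier
def pvPick (g : String → Option String) (notes : List (List (String × String))) (d : String) : String :=
  (((notes.map pvLow).reverse.map g).reduceOption).headD d

theorem pvHeadD_append {α : Type} (xs ys : List α) (d : α) :
    (xs ++ ys).headD d = xs.headD (ys.headD d) := by
  cases xs <;> simp

theorem pvPick_cons (g : String → Option String) (n : List (String × String))
    (rest : List (List (String × String))) (d : String) :
    pvPick g (n :: rest) d = pvPick g rest ((g (pvLow n)).getD d) := by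
  simp only [pvPick, List.map_cons, List.reverse_cons, List.map_append, List.reduceOption_append]
  rw [pvHeadD_append]
  cases g (pvLow n) <;> simp [List.reduceOption]

theorem pvAStep_literal (m t : String) (n : List (String × String)) :
    pvAStep (PySem.Dict.mk [("preferred_method", m), ("best_time_to_contact", t), ("frequency", "weekly")]) n
    = PySem.Dict.mk [("preferred_method", (pvClassifyMethod (pvLow n)).getD m),
                     ("best_time_to_contact", (pvClassifyTime (pvLow n)).getD t), ("frequency", "weekly")] := by
  simp only [pvAStep, pvClassifyMethod, pvClassifyTime, pvLow]
  split_ifs <;> simp [PySem.Dict.insert, PySem.Dict.contains, List.any, List.map]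

theorem pvFoldl_items (notes : List (List (String × String))) : ∀ (m t : String),
    (notes.foldl pvAStep (PySem.Dict.mk [("preferred_method", m), ("best_time_to_contact", t), ("frequency", "weekly")])).items
    = [("preferred_method", pvPick pvClassifyMethod notes m),
       ("best_time_to_contact", pvPick pvClassifyTime notes t), ("frequency", "weekly")] := by
  induction notes with
  | nil => intro m t; rfl
  | cons n rest ih =>
    intro m t
    simp only [List.foldl_cons, pvAStep_literal, ih, pvPick_cons]

-- ===== VERDICT (by name: the statement is the Claim_ definition above) =====
theorem extract_communication_preferences_py_spec : Claim_equal_extract_communication_preferences_py := by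
  intro person notes _
  show _ = _
  simp only [extract_communication_preferences_py, extract_communication_preferences_py_alt, pvFoldl_items]
  rfl
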